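-- pv_equiv track=rewrite | github.com/ishandutta2007/codeforces | komendart/normal/479/E.py | solve
-- ===== SOURCE A (Python) =====
-- def solve(n, st, k):
--     MOD = int(1e9 + 7)
--     dp = [0] * (n + 1)
--     prefix_sum = [0] * (n + 1)
--     dp[st] = 1
--     for times in range(k):
--         prefix_sum[0] = 0
--         for i in range(1, n + 1):
--             prefix_sum[i] = prefix_sum[i - 1] + dp[i]
--             if prefix_sum[i] >= MOD: prefix_sum[i] -= MOD
--         for i in range(1, n + 1):
--             dp[i] = prefix_sum[n] - dp[i] - prefix_sum[i >> 1]
--             while dp[i] < 0: dp[i] += MOD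
--             while dp[i] >= MOD: dp[i] -= MOD
--     return sum(dp) % MOD
-- ===== SOURCE B (Python) =====
-- def solve(n, st, k):
--     # Positions live at indices 1..n; index 0 is inert (never updated by the
--     # recurrence), so each step keeps dp[0] and rebuilds indices 1..n by a
--     # direct range scan instead of a prefix-sum table.
--     MOD = 10 ** 9 + 7
--     dp = [0] * (n + 1)
--     dp[st] = 1
--     for _ in range(k):
--         dp = dp[:1] + [
--             sum(dp[j] for j in range((i >> 1) + 1, n + 1) if j != i) % MOD
--             for i in range(1, n + 1)
--         ]
--     return sum(dp) % MOD
-- ===== Notes on version B (the rewrite author's own statement) =====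
-- stated objective: alternative
-- what changed: Each DP step rebuilds the array by directly summing dp[j] over j in (i>>1)+1..n skipping j==i and reducing mod MOD, eliminating A's prefix-sum table and its while-loop normalisation.
import Mathlib
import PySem

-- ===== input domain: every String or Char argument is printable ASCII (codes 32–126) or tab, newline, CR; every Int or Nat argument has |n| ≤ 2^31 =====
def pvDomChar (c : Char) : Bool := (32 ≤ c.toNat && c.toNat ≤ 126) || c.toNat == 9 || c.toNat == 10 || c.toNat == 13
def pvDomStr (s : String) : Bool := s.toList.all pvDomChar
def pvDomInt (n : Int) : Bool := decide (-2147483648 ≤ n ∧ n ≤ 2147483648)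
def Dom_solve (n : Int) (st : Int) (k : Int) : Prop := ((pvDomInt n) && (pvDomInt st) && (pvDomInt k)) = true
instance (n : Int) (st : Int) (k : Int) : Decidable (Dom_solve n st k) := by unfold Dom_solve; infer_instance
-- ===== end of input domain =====

-- B replaces A's per-step prefix-sum table (and its while-loop normalisation) by a direct
-- range scan per index — an alternative decomposition with the same results.

-- ===== PORT A =====
def pvMOD : Int := 1000000007

-- 'while dp[i] < 0: dp[i] += MOD'
def pvNormUp (x : Int) : Int :=
  if x < 0 then pvNormUp (x + pvMOD) else x
termination_by (-x).toNat
decreasing_by simp only [pvMOD] at *; omega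

-- 'while dp[i] >= MOD: dp[i] -= MOD'
def pvNormDown (x : Int) : Int :=
  if x ≥ pvMOD then pvNormDown (x - pvMOD) else x
termination_by x.toNat
decreasing_by simp only [pvMOD] at *; omega

-- 'for i in range(1, n+1): prefix_sum[i] = prefix_sum[i-1] + dp[i]; if ... >= MOD: ... -= MOD'
def pvPrefix (acc : Int) : List Int → List Int
  | [] => []
  | d :: rest =>
      (if acc + d ≥ pvMOD then acc + d - pvMOD else acc + d) ::
        pvPrefix (if acc + d ≥ pvMOD then acc + d - pvMOD else acc + d) rest

-- one iteration of A's 'for times in range(k)' body (dp[0] is never written by the loops)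
def pvStepA (n : Nat) (dp : List Int) : List Int :=
  let ps : List Int := 0 :: pvPrefix 0 dp.tail
  dp.getD 0 0 :: (List.range n).map (fun i0 =>
    let i := i0 + 1
    pvNormDown (pvNormUp (ps.getD n 0 - dp.getD i 0 - ps.getD (i / 2) 0)))

def solve (n : Int) (st : Int) (k : Int) : Int :=
  let dp0 := (List.replicate (n + 1).toNat 0).set (if st < 0 then st + n + 1 else st).toNat 1
  let dp := (List.range k.toNat).foldl (fun dp _ => pvStepA n.toNat dp) dp0
  (dp.foldl (· + ·) 0) % pvMOD

-- ===== PORT B =====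
-- 'sum(dp[j] for j in range((i >> 1) + 1, n + 1) if j != i) % MOD'
def pvRowSum (dp : List Int) (n i : Nat) : Int :=
  ((List.range' (i / 2 + 1) (n - i / 2)).foldl
    (fun s j => if j ≠ i then s + dp.getD j 0 else s) 0) % pvMOD

-- one iteration of B's loop body: 'dp = dp[:1] + [rowsum(i) for i in range(1, n+1)]'
def pvStepB (n : Nat) (dp : List Int) : List Int :=
  dp.take 1 ++ (List.range n).map (fun i0 => pvRowSum dp n (i0 + 1))

def solve_alt (n : Int) (st : Int) (k : Int) : Int :=
  let dp0 := (List.replicate (n + 1).toNat 0).set (if st < 0 then st + n + 1 else st).toNat 1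
  let dp := (List.range k.toNat).foldl (fun dp _ => pvStepB n.toNat dp) dp0
  (dp.foldl (· + ·) 0) % pvMOD

-- ===== PRECONDITION & SPEC =====
-- Pre_ excludes exactly the inputs on which Python A raises IndexError at 'dp[st] = 1'
-- (n < 0, or st outside Python's index range [-(n+1), n]); k is unconstrained (range(k) is empty for k ≤ 0).
def Pre_solve (n : Int) (st : Int) (k : Int) : Prop := 0 ≤ n ∧ -(n + 1) ≤ st ∧ st ≤ n
instance (n : Int) (st : Int) (k : Int) : Decidable (Pre_solve n st k) := by unfold Pre_solve; infer_instance
def pvWitness_solve : Int × Int × Int := (3, 1, 2)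

def Spec_solve (n : Int) (st : Int) (k : Int) (out : Int) : Prop := out = solve_alt n st k
instance (n : Int) (st : Int) (k : Int) (out : Int) : Decidable (Spec_solve n st k out) := by unfold Spec_solve; infer_instance

-- ===== CLAIM (what is proved, stated in full; the proofs are below) =====
def Claim_equal_solve : Prop := ∀ (n : Int) (st : Int) (k : Int), Dom_solve n st k → Pre_solve n st k → Spec_solve n st k (solve n st k)

-- ===== LEMMAS AND PROOFS =====

-- invariant carried through the k steps: length n+1 and all entries in [0, MOD)
def pvInv (n : Nat) (dp : List Int) : Prop :=
  dp.length = n + 1 ∧ ∀ x ∈ dp, 0 ≤ x ∧ x < pvMOD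

theorem pvNormUp_spec (x : Int) : 0 ≤ pvNormUp x ∧ pvNormUp x % pvMOD = x % pvMOD := by
  induction x using pvNormUp.induct with
  | case1 x h ih =>
      rw [pvNormUp, if_pos h]
      exact ⟨ih.1, by rw [ih.2, Int.add_emod_right]⟩
  | case2 x h =>
      rw [pvNormUp, if_neg h]
      exact ⟨by omega, rfl⟩

theorem pvNormDown_spec (x : Int) (hx : 0 ≤ x) :
    0 ≤ pvNormDown x ∧ pvNormDown x < pvMOD ∧ pvNormDown x % pvMOD = x % pvMOD := by
  induction x using pvNormDown.induct with
  | case1 x h ih =>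
      rw [pvNormDown, if_pos h]
      have := ih (by simp only [pvMOD] at *; omega)
      exact ⟨this.1, this.2.1, by rw [this.2.2, Int.sub_emod_right]⟩
  | case2 x h =>
      rw [pvNormDown, if_neg h]
      exact ⟨hx, by omega, rfl⟩

-- the two while loops together compute x % MOD
theorem pvNorm_eq_emod (x : Int) : pvNormDown (pvNormUp x) = x % pvMOD := by
  obtain ⟨h1, h2⟩ := pvNormUp_spec x
  obtain ⟨a, b, c⟩ := pvNormDown_spec _ h1
  rw [h2] at c
  rw [← c]
  exact (Int.emod_eq_of_lt a b).symm

theorem pvTail_getD (dp : List Int) (t : Nat) : dp.tail.getD t 0 = dp.getD (t + 1) 0 := by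
  cases dp <;> simp [List.getD]

-- A's prefix table holds the running sums mod MOD
theorem pvPrefix_getD (l : List Int) (acc : Int) (t : Nat)
    (ha1 : 0 ≤ acc) (ha2 : acc < pvMOD) (hl : ∀ x ∈ l, 0 ≤ x ∧ x < pvMOD) (ht : t < l.length) :
    (pvPrefix acc l).getD t 0 = (acc + (l.take (t + 1)).sum) % pvMOD := by
  induction l generalizing acc t with
  | nil => simp at ht
  | cons d rest ih =>
      have hd := hl d (by simp)
      have hv : (if acc + d ≥ pvMOD then acc + d - pvMOD else acc + d) = (acc + d) % pvMOD := by
        simp only [pvMOD] at *; split_ifs <;> omega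
      rw [pvPrefix, hv]
      cases t with
      | zero => simp
      | succ t =>
          rw [List.getD_cons_succ]
          rw [ih ((acc + d) % pvMOD) t (by simp only [pvMOD]; omega) (by simp only [pvMOD]; omega)
              (fun x hx => hl x (by simp [hx])) (by simpa using ht)]
          rw [List.take_succ_cons, List.sum_cons]
          simp only [pvMOD]
          omega

-- sum over a contiguous index range = difference of take-sums
theorem pvSumTake (l : List Int) (m : Nat) : ∀ (a : Nat), a + m ≤ l.length →
    ((List.range' a m).map (fun j => l.getD j 0)).sum = (l.take (a + m)).sum - (l.take a).sum := by
  induction m with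
  | zero => simp
  | succ m ih =>
      intro a h
      rw [List.range'_succ, List.map_cons, List.sum_cons, ih (a + 1) (by omega)]
      have ha : a < l.length := by omega
      have h1 : (l.take (a + 1)).sum = (l.take a).sum + l.getD a 0 := by
        rw [List.sum_take_succ l a ha, List.getD_eq_getElem l 0 ha]
      rw [show a + 1 + m = a + (m + 1) by omega] at *
      omega

theorem pvFoldNoSkip (g : Nat → Int) (i : Nat) (l : List Nat) (h : ∀ j ∈ l, j ≠ i) (s : Int) :
    l.foldl (fun s j => if j ≠ i then s + g j else s) s = s + (l.map g).sum := by
  induction l generalizing s with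
  | nil => simp
  | cons a t ih =>
      simp only [List.foldl_cons, List.map_cons, List.sum_cons]
      rw [if_pos (h a (by simp)), ih (fun j hj => h j (by simp [hj]))]
      ring

-- B's conditional fold over a range containing i once = full range sum minus g i
theorem pvFoldSkip (g : Nat → Int) (i m : Nat) : ∀ (a : Nat) (s : Int), a ≤ i → i < a + m →
    (List.range' a m).foldl (fun s j => if j ≠ i then s + g j else s) s
      = s + ((List.range' a m).map g).sum - g i := by
  induction m with
  | zero => omega
  | succ m ih =>
      intro a s h1 h2
      rw [List.range'_succ]
      simp only [List.foldl_cons, List.map_cons, List.sum_cons]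
      by_cases hai : a = i
      · subst hai
        rw [if_neg (by simp)]
        rw [pvFoldNoSkip g a _ (fun j hj => by
          have := List.mem_range'_1.mp hj; omega) s]
        ring
      · rw [if_pos hai]
        rw [ih (a + 1) (s + g a) (by omega) (by omega)]
        ring

theorem pvShiftMap (dp : List Int) (m : Nat) : ∀ (a : Nat),
    (List.range' (a + 1) m).map (fun j => dp.getD j 0)
      = (List.range' a m).map (fun t => dp.tail.getD t 0) := by
  induction m with
  | zero => simp
  | succ m ih =>
      intro a
      rw [List.range'_succ, List.range'_succ, List.map_cons, List.map_cons, pvTail_getD, ih (a + 1)]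

-- one updated entry of A's step = the corresponding range-scan entry of B's step
theorem pvElem_eq (n : Nat) (dp : List Int) (hlen : dp.length = n + 1)
    (hbd : ∀ x ∈ dp, 0 ≤ x ∧ x < pvMOD) (i : Nat) (h1 : 1 ≤ i) (h2 : i ≤ n) :
    pvNormDown (pvNormUp ((0 :: pvPrefix 0 dp.tail).getD n 0 - dp.getD i 0
        - (0 :: pvPrefix 0 dp.tail).getD (i / 2) 0)) = pvRowSum dp n i := by
  have hrest : dp.tail.length = n := by cases dp <;> simp_all
  have hbd' : ∀ x ∈ dp.tail, 0 ≤ x ∧ x < pvMOD := fun x hx => hbd x (List.mem_of_mem_tail hx)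
  have hM : (0:Int) < pvMOD := by norm_num [pvMOD]
  have hpsn : (0 :: pvPrefix 0 dp.tail).getD n 0 = (dp.tail.take n).sum % pvMOD := by
    obtain ⟨m, rfl⟩ : ∃ m, n = m + 1 := ⟨n - 1, by omega⟩
    rw [List.getD_cons_succ, pvPrefix_getD dp.tail 0 m le_rfl hM hbd' (by omega)]
    simp
  have hpsh : (0 :: pvPrefix 0 dp.tail).getD (i / 2) 0 = (dp.tail.take (i / 2)).sum % pvMOD := by
    rcases Nat.eq_zero_or_pos (i / 2) with hz | hp
    · simp [hz]
    · obtain ⟨m, hm⟩ : ∃ m, i / 2 = m + 1 := ⟨i / 2 - 1, by omega⟩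
      rw [hm, List.getD_cons_succ, pvPrefix_getD dp.tail 0 m le_rfl hM hbd' (by omega)]
      simp
  rw [hpsn, hpsh, pvNorm_eq_emod]
  unfold pvRowSum
  rw [pvFoldSkip (fun j => dp.getD j 0) i (n - i / 2) (i / 2 + 1) 0 (by omega) (by omega)]
  rw [pvShiftMap dp (n - i / 2) (i / 2)]
  rw [pvSumTake dp.tail (n - i / 2) (i / 2) (by omega)]
  rw [show i / 2 + (n - i / 2) = n by omega]
  simp only [pvMOD]
  omega

theorem pvStep_eq (n : Nat) (dp : List Int) (h : pvInv n dp) : pvStepA n dp = pvStepB n dp := by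
  obtain ⟨hlen, hbd⟩ := h
  have htake : dp.take 1 = [dp.getD 0 0] := by
    cases dp with
    | nil => simp at hlen
    | cons d t => simp [List.getD]
  unfold pvStepA pvStepB
  rw [htake]
  simp only [List.singleton_append, List.cons.injEq, true_and]
  apply List.map_congr_left
  intro i0 hi0
  have hi : i0 + 1 ≤ n := by simpa using List.mem_range.mp hi0
  exact pvElem_eq n dp hlen hbd (i0 + 1) (by omega) hi

theorem pvStepB_inv (n : Nat) (dp : List Int) (h : pvInv n dp) : pvInv n (pvStepB n dp) := by
  obtain ⟨hlen, hbd⟩ := h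
  constructor
  · simp only [pvStepB, List.length_append, List.length_take, List.length_map, List.length_range]
    omega
  · intro x hx
    simp only [pvStepB, List.mem_append] at hx
    rcases hx with hx | hx
    · exact hbd x (List.mem_of_mem_take hx)
    · obtain ⟨i0, -, rfl⟩ := List.mem_map.mp hx
      unfold pvRowSum
      exact ⟨Int.emod_nonneg _ (by norm_num [pvMOD]), Int.emod_lt_of_pos _ (by norm_num [pvMOD])⟩

theorem pvIter (n m : Nat) (dp : List Int) (h : pvInv n dp) :
    (List.range m).foldl (fun d _ => pvStepA n d) dp
      = (List.range m).foldl (fun d _ => pvStepB n d) dp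
    ∧ pvInv n ((List.range m).foldl (fun d _ => pvStepB n d) dp) := by
  induction m with
  | zero => exact ⟨rfl, h⟩
  | succ m ih =>
      rw [List.range_succ, List.foldl_append, List.foldl_append]
      simp only [List.foldl_cons, List.foldl_nil]
      obtain ⟨he, hi⟩ := ih
      exact ⟨by rw [he, pvStep_eq _ _ hi], pvStepB_inv _ _ hi⟩

theorem pvInit_inv (n st : Int) (hn : 0 ≤ n) :
    pvInv n.toNat ((List.replicate (n + 1).toNat 0).set (if st < 0 then st + n + 1 else st).toNat 1) := by
  constructor
  · rw [List.length_set, List.length_replicate]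
    omega
  · intro x hx
    rcases List.mem_or_eq_of_mem_set hx with h | h
    · rw [List.eq_of_mem_replicate h]
      norm_num [pvMOD]
    · rw [h]
      norm_num [pvMOD]

-- ===== VERDICT (by name: the statement is the Claim_ definition above) =====
theorem solve_spec : Claim_equal_solve := by
  intro n st k _ hpre
  obtain ⟨hn, -, -⟩ := hpre
  unfold Spec_solve solve solve_alt
  exact congrArg (fun l => l.foldl (· + ·) 0 % pvMOD)
    (pvIter n.toNat k.toNat _ (pvInit_inv n st hn)).1
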